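-- pv_equiv track=rewrite | github.com/mast-group/eqnet | data/identifiersplitter.py | split_identifier_into_parts
-- ===== SOURCE A (Python) =====
-- def split_camelcase(camel_case_identifier):
--     """
--     :type camel_case_identifier: str
--     :param camel_case_identifier:
--     :return:
--     """
--     if not len(camel_case_identifier):
--         return []
--
--     # split into words based on adjacent cases being the same
--     result = []
--     current = str(camel_case_identifier[0])
--     prev_upper = camel_case_identifier[0].isupper()
--     prev_digit = camel_case_identifier[0].isdigit()
--     prev_special = not camel_case_identifier[0].isalnum()
--     for c in camel_case_identifier[1:]:
--         upper = c.isupper()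
--         digit = c.isdigit()
--         special = not c.isalnum()
--         new_upper_word = upper and not prev_upper
--         new_digit_word = digit and not prev_digit
--         new_special_word = special and not prev_special
--         if new_digit_word or new_upper_word or new_special_word:
--             result.append(current)
--             current = c
--         elif not upper and prev_upper and len(current) > 1:
--             result.append(current[:-1])
--             current = current[-1] + c
--         elif not digit and prev_digit:
--             result.append(current)
--             current = c
--         elif not special and prev_special:
--             result.append(current)
--             current = c
--         else:
--             current += c
--         prev_digit = digit
--         prev_upper = upper
--         prev_special = special
--     result.append(current)
--     return result
--
-- def split_identifier_into_parts(identifier):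
--     """
--     Split a single identifier into parts.
--     :param identifier:
--     :return:
--     """
--     if identifier is None:
--         return [None]
--     snake_case = identifier.split("_")
--
--     identifier_parts = []
--     for i in range(len(snake_case)):
--         part = snake_case[i]
--         if len(part) > 0:
--             identifier_parts.extend(split_camelcase(part))
--         if i < len(snake_case) - 1:
--             identifier_parts.append("_")
--     return identifier_parts
-- ===== SOURCE B (Python) =====
-- # B: span-based splitter — instead of A's char-by-char state machine with
-- # prev_* flags and a growing `current` buffer, classify each char into one of
-- # four categories and slice the string into maximal same-category runs,
-- # handling the "uppercase run followed by lowercase" merge at run level.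
--
-- def _cat(c):
--     if not c.isalnum():
--         return 3
--     if c.isdigit():
--         return 2
--     if c.isupper():
--         return 1
--     return 0
--
--
-- def split_camelcase(s):
--     words = []
--     i = 0
--     n = len(s)
--     while i < n:
--         k = _cat(s[i])
--         j = i + 1
--         while j < n and _cat(s[j]) == k:
--             j += 1
--         if k == 1 and j < n and _cat(s[j]) == 0:
--             # uppercase run directly followed by lowercase: the last upper
--             # char starts the lowercase word; the rest (if any) is its own word
--             m = j + 1
--             while m < n and _cat(s[m]) == 0:
--                 m += 1
--             if j - i > 1:
--                 words.append(s[i:j - 1])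
--             words.append(s[j - 1:m])
--             i = m
--         else:
--             words.append(s[i:j])
--             i = j
--     return words
--
--
-- def split_identifier_into_parts(identifier):
--     if identifier is None:
--         return [None]
--     out = []
--     for i, part in enumerate(identifier.split("_")):
--         if i:
--             out.append("_")
--         if part:
--             out.extend(split_camelcase(part))
--     return out
-- ===== Notes on version B (the rewrite author's own statement) =====
-- stated objective: alternative
-- what changed: Replaces A's char-by-char state machine (prev_upper/prev_digit/prev_special flags, a growing current buffer and a backtracking re-append) with a span scanner that classifies each char into one of four categories and slices the string into maximal same-category runs, merging the last uppercase of an upper run into a following lowercase run at run level.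
import Mathlib
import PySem

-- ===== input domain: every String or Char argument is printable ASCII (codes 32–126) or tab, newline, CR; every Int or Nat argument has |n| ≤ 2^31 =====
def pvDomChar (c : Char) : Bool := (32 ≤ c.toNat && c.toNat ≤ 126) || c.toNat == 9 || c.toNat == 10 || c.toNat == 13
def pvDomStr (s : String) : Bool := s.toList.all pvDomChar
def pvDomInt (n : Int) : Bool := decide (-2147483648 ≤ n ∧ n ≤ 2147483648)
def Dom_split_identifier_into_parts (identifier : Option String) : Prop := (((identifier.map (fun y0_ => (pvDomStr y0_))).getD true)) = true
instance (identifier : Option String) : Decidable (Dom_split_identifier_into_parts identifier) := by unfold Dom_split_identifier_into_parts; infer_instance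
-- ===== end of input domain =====

-- B replaces A's char-by-char state machine (prev_* flags, growing `current`
-- buffer, backtracking append) by a span scanner over maximal same-category
-- runs; objective: alternative decomposition, same behaviour on all inputs.

-- ===== PORT A =====
-- the loop of split_camelcase: state = (result, current, prev_upper, prev_digit, prev_special)
def pvLoopA : List Char → List (List Char) → List Char → Bool → Bool → Bool → List (List Char)
  | [], result, current, _, _, _ => result ++ [current]
  | c :: cs, result, current, prevU, prevD, prevS =>
    let upper := PySem.Chars.isupper c
    let digit := PySem.Chars.isdigit c
    let special := !PySem.Chars.isalnum c
    if (digit && !prevD) || (upper && !prevU) || (special && !prevS) then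
      pvLoopA cs (result ++ [current]) [c] upper digit special
    else if !upper && prevU && decide (1 < current.length) then
      -- current[:-1], current[-1] + c  (current is nonempty here)
      pvLoopA cs (result ++ [current.dropLast]) [PySem.List.pyGetD current (-1) 'a', c] upper digit special
    else if !digit && prevD then
      pvLoopA cs (result ++ [current]) [c] upper digit special
    else if !special && prevS then
      pvLoopA cs (result ++ [current]) [c] upper digit special
    else
      pvLoopA cs result (current ++ [c]) upper digit special

def pvSplitCamelA : List Char → List (List Char)
  | [] => []
  | c0 :: rest =>
    pvLoopA rest [] [c0] (PySem.Chars.isupper c0) (PySem.Chars.isdigit c0)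
      (!PySem.Chars.isalnum c0)

def split_identifier_into_parts (identifier : Option String) : List (Option String) :=
  match identifier with
  | none => [none]
  | some id =>
    let snake := PySem.Chars.splitOn id.toList ['_']
    (List.range snake.length).foldl
      (fun identifier_parts i =>
        let part := snake.getD i []
        let identifier_parts :=
          if 0 < part.length then
            identifier_parts ++ (pvSplitCamelA part).map (fun w => (some (String.ofList w) : Option String))
          else identifier_parts
        if i < snake.length - 1 then identifier_parts ++ [(some "_" : Option String)]
        else identifier_parts) []

-- ===== PORT B =====
def pvCat (c : Char) : Nat :=
  if !PySem.Chars.isalnum c then 3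
  else if PySem.Chars.isdigit c then 2
  else if PySem.Chars.isupper c then 1
  else 0

def pvHeadLow : List Char → Bool
  | [] => false
  | d :: _ => pvCat d == 0

def pvSplitCamelB : List Char → List (List Char)
  | [] => []
  | c :: cs =>
    let k := pvCat c
    let run := cs.takeWhile (fun d => pvCat d == k)
    let rest := cs.dropWhile (fun d => pvCat d == k)
    if k == 1 && pvHeadLow rest then
      let lows := rest.takeWhile (fun d => pvCat d == 0)
      let rest2 := rest.dropWhile (fun d => pvCat d == 0)
      (if 0 < run.length then [(c :: run).dropLast] else []) ++
        ((c :: run).getLastD 'A' :: lows) :: pvSplitCamelB rest2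
    else
      (c :: run) :: pvSplitCamelB rest
  termination_by s => s.length
  decreasing_by
  · have h1 : (cs.dropWhile (fun d => pvCat d == pvCat c)).length ≤ cs.length :=
      cs.length_dropWhile_le _
    have h2 : ((cs.dropWhile (fun d => pvCat d == pvCat c)).dropWhile
        (fun d => pvCat d == 0)).length ≤ (cs.dropWhile (fun d => pvCat d == pvCat c)).length :=
      List.length_dropWhile_le _ _
    simp; omega
  · have h1 : (cs.dropWhile (fun d => pvCat d == pvCat c)).length ≤ cs.length :=
      cs.length_dropWhile_le _
    simp; omega

def split_identifier_into_parts_alt (identifier : Option String) : List (Option String) :=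
  match identifier with
  | none => [none]
  | some id =>
    (PySem.List.enumerate (PySem.Chars.splitOn id.toList ['_']) 0).foldl
      (fun out p =>
        if p.2.isEmpty then (if p.1 == 0 then out else out ++ [(some "_" : Option String)])
        else (if p.1 == 0 then out else out ++ [(some "_" : Option String)]) ++
          (pvSplitCamelB p.2).map (fun w => (some (String.ofList w) : Option String))) []

-- ===== PRECONDITION & SPEC =====
def Spec_split_identifier_into_parts (identifier : Option String) (out : List (Option String)) : Prop := out = split_identifier_into_parts_alt identifier
instance (identifier : Option String) (out : List (Option String)) : Decidable (Spec_split_identifier_into_parts identifier out) := by unfold Spec_split_identifier_into_parts; infer_instance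

-- ===== CLAIM (what is proved, stated in full; the proofs are below) =====
def Claim_equal_split_identifier_into_parts : Prop := ∀ (identifier : Option String), Dom_split_identifier_into_parts identifier → Spec_split_identifier_into_parts identifier (split_identifier_into_parts identifier)


-- ===== LEMMAS AND PROOFS =====

lemma upper_alnum {c : Char} (h : PySem.Chars.isupper c = true) : PySem.Chars.isalnum c = true := by
  simp [PySem.Chars.isalnum, PySem.Chars.isalpha, h]

lemma digit_alnum {c : Char} (h : PySem.Chars.isdigit c = true) : PySem.Chars.isalnum c = true := by
  simp [PySem.Chars.isalnum, h]

lemma upper_not_digit {c : Char} (h : PySem.Chars.isupper c = true) : PySem.Chars.isdigit c = false := by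
  simp [PySem.Chars.isupper, Char.le_def, UInt32.le_iff_toNat_le] at h
  simp [PySem.Chars.isdigit, Char.le_def, UInt32.le_iff_toNat_le]
  intro h2
  omega

lemma isupper_eq (c : Char) : PySem.Chars.isupper c = decide (pvCat c = 1) := by
  unfold pvCat
  cases hu : PySem.Chars.isupper c
  · split_ifs <;> simp_all
  · simp [upper_alnum hu, upper_not_digit hu]

lemma isdigit_eq (c : Char) : PySem.Chars.isdigit c = decide (pvCat c = 2) := by
  unfold pvCat
  cases hd : PySem.Chars.isdigit c
  · split_ifs <;> simp_all
  · simp [digit_alnum hd]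

lemma isalnum_eq (c : Char) : PySem.Chars.isalnum c = !decide (pvCat c = 3) := by
  unfold pvCat
  cases ha : PySem.Chars.isalnum c <;> split_ifs <;> simp_all

lemma pvCat_lt (c : Char) : pvCat c < 4 := by
  unfold pvCat; split_ifs <;> omega

lemma getLastD_indep {xs : List Char} (h : xs ≠ []) (d e : Char) :
    xs.getLast?.getD d = xs.getLast?.getD e := by
  cases h' : xs.getLast? with
  | none => exact absurd (List.getLast?_eq_none_iff.mp h') h
  | some x => rfl

def pvGk (k : Nat) (current : List Char) (cs : List Char) : List (List Char) :=
  let run := cs.takeWhile (fun d => pvCat d == k)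
  let rest := cs.dropWhile (fun d => pvCat d == k)
  if k == 1 && pvHeadLow rest then
    let lows := rest.takeWhile (fun d => pvCat d == 0)
    let rest2 := rest.dropWhile (fun d => pvCat d == 0)
    (if 1 < (current ++ run).length then [(current ++ run).dropLast] else []) ++
      ((current ++ run).getLastD 'A' :: lows) :: pvSplitCamelB rest2
  else (current ++ run) :: pvSplitCamelB rest

def pvG (current : List Char) (cs : List Char) : List (List Char) :=
  pvGk (pvCat (current.getLastD 'a')) current cs

lemma G1 (c : Char) (cs : List Char) : pvSplitCamelB (c :: cs) = pvG [c] cs := by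
  rw [pvSplitCamelB, pvG, pvGk]
  simp

lemma S1 (current : List Char) (c : Char) (cs : List Char) (_hne : current ≠ [])
    (h : pvCat c = pvCat (current.getLastD 'a')) :
    pvG current (c :: cs) = pvG (current ++ [c]) cs := by
  rw [pvG, pvG, pvGk, pvGk]
  simp [h]

lemma S2 (current : List Char) (c : Char) (cs : List Char) (hne : current ≠ [])
    (ha : pvCat (current.getLastD 'a') = 1) (hb : pvCat c = 0) (hl : 1 < current.length) :
    pvG current (c :: cs) =
      current.dropLast :: pvG [current.getLastD 'a', c] cs := by
  rw [pvG, pvG, ha, pvGk, pvGk]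
  simp [hb, pvHeadLow, hl]
  exact getLastD_indep hne 'A' 'a'

lemma S2' (current : List Char) (c : Char) (cs : List Char) (_hne : current ≠ [])
    (ha : pvCat (current.getLastD 'a') = 1) (hb : pvCat c = 0) (hl : current.length = 1) :
    pvG current (c :: cs) = pvG (current ++ [c]) cs := by
  obtain ⟨x, rfl⟩ : ∃ x, current = [x] := by
    match current, hl with
    | [x], _ => exact ⟨x, rfl⟩
  simp at ha
  rw [pvG, pvG, pvGk, pvGk]
  simp [ha, hb, pvHeadLow]

lemma S3 (current : List Char) (c : Char) (cs : List Char) (hne : current ≠ [])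
    (h : pvCat c ≠ pvCat (current.getLastD 'a'))
    (h2 : ¬ (pvCat (current.getLastD 'a') = 1 ∧ pvCat c = 0)) :
    pvG current (c :: cs) = current :: pvSplitCamelB (c :: cs) := by
  rw [pvG]
  generalize hg : pvCat (current.getLastD 'a') = k at h h2 ⊢
  rw [pvGk]
  by_cases h1 : k = 1
  · have hc0 : pvCat c ≠ 0 := fun hc => h2 ⟨h1, hc⟩
    subst h1
    simp [h, pvHeadLow, hc0]
  · simp [h1, h]

lemma L : ∀ (cs : List Char) (result : List (List Char)) (current : List Char)
    (pU pD pS : Bool), current ≠ [] →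
    pU = decide (pvCat (current.getLastD 'a') = 1) →
    pD = decide (pvCat (current.getLastD 'a') = 2) →
    pS = decide (pvCat (current.getLastD 'a') = 3) →
    pvLoopA cs result current pU pD pS = result ++ pvG current cs := by
  intro cs
  induction cs with
  | nil =>
    intro result current pU pD pS hne hU hD hS
    simp [pvLoopA, pvG, pvGk, pvHeadLow, pvSplitCamelB]
  | cons c cs ih =>
    intro result current pU pD pS hne hU hD hS
    subst hU hD hS
    simp only [pvLoopA, isupper_eq, isdigit_eq, isalnum_eq]
    have ha4 := pvCat_lt (current.getLastD 'a')
    have hb4 := pvCat_lt c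
    have hlen : 0 < current.length := List.length_pos_iff.mpr hne
    rcases (by omega : pvCat (current.getLastD 'a') = 0 ∨ pvCat (current.getLastD 'a') = 1 ∨
        pvCat (current.getLastD 'a') = 2 ∨ pvCat (current.getLastD 'a') = 3) with hA|hA|hA|hA <;>
      rcases (by omega : pvCat c = 0 ∨ pvCat c = 1 ∨ pvCat c = 2 ∨ pvCat c = 3) with hB|hB|hB|hB <;>
      simp only [hA, hB] <;> norm_num <;>
      first
      | -- same category: append branch
        (rw [ih result (current ++ [c]) _ _ _ (by simp) (by simp [hA, hB]) (by simp [hA, hB])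
              (by simp [hA, hB]), ← S1 current c cs hne (by omega)])
      | -- cut branch
        (rw [ih (result ++ [current]) [c] _ _ _ (by simp) (by simp [hB]) (by simp [hB])
              (by simp [hB]), S3 current c cs hne (by omega) (by omega), G1]
         simp)
      | skip
    -- remaining: the (upper, lower) backtrack case
    have hlast : current.getLastD 'a' = current.getLast hne := by
      rw [List.getLastD_eq_getLast?, List.getLast?_eq_getLast hne]; rfl
    by_cases hl : 1 < current.length
    · simp only [hl, if_true]
      rw [PySem.List.pyGetD_neg_one _ 'a' hne]
      rw [ih (result ++ [current.dropLast]) [current.getLast hne, c] _ _ _ (by simp)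
            (by simp [hB]) (by simp [hB]) (by simp [hB])]
      rw [S2 current c cs hne hA hB hl, hlast]
      simp
    · have hl1 : current.length = 1 := by omega
      simp only [hl, if_false]
      rw [ih result (current ++ [c]) _ _ _ (by simp) (by simp [hB]) (by simp [hB]) (by simp [hB]),
        ← S2' current c cs hne hA hB hl1]

lemma camel_eq (s : List Char) : pvSplitCamelA s = pvSplitCamelB s := by
  cases s with
  | nil => simp [pvSplitCamelA, pvSplitCamelB]
  | cons c cs =>
    rw [pvSplitCamelA, L cs [] [c] _ _ _ (by simp) (by simp [isupper_eq])
      (by simp [isdigit_eq]) (by simp [isalnum_eq]), G1]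
    simp

def pvW (p : List Char) : List (Option String) :=
  if p = [] then [] else (pvSplitCamelB p).map (fun w => (some (String.ofList w) : Option String))

def pvJA : List (List Char) → List (Option String)
  | [] => []
  | p :: ps => pvW p ++ (if ps.isEmpty then [] else [(some "_" : Option String)]) ++ pvJA ps

lemma A1 : ∀ (ps snake : List (List Char)) (st : Nat) (acc : List (Option String)),
    snake.drop st = ps → st ≤ snake.length →
    List.foldl
      (fun identifier_parts i =>
        let part := snake.getD i []
        let identifier_parts :=
          if 0 < part.length then
            identifier_parts ++ (pvSplitCamelA part).map (fun w => (some (String.ofList w) : Option String))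
          else identifier_parts
        if i < snake.length - 1 then identifier_parts ++ [(some "_" : Option String)]
        else identifier_parts) acc (List.range' st ps.length) = acc ++ pvJA ps := by
  intro ps
  induction ps with
  | nil => intro snake st acc _ _; simp [pvJA]
  | cons p ps ih =>
    intro snake st acc hdrop hle
    have hlen : snake.length = st + ps.length + 1 := by
      have := congrArg List.length hdrop
      simp at this
      omega
    have hpart : snake.getD st [] = p := by
      have h0 : (snake.drop st)[0]? = some p := by rw [hdrop]; rfl
      rw [List.getElem?_drop] at h0
      simp only [Nat.add_zero] at h0
      simp [List.getD, h0]
    have hdrop' : snake.drop (st + 1) = ps := by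
      have h1 : (snake.drop st).drop 1 = snake.drop (st + 1) := List.drop_drop
      rw [hdrop] at h1
      rw [← h1]
      rfl
    rw [show (p :: ps).length = ps.length + 1 from rfl, List.range'_succ, List.foldl_cons]
    have hcond : (st < snake.length - 1) ↔ ps ≠ [] := by
      rcases ps with _ | ⟨q, qs⟩ <;> simp [hlen]
    rw [ih snake (st + 1) _ hdrop' (by omega)]
    rw [pvJA]
    simp only [hpart]
    by_cases hp : p = [] <;> by_cases hps : ps = [] <;>
      simp [hp, hps, pvW, pvJA, camel_eq, hcond, List.length_pos_iff]

lemma B1 : ∀ (ps : List (List Char)) (out : List (Option String)) (j : Int), 1 ≤ j →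
    List.foldl
      (fun out p =>
        if p.2.isEmpty then (if p.1 == 0 then out else out ++ [(some "_" : Option String)])
        else (if p.1 == 0 then out else out ++ [(some "_" : Option String)]) ++
          (pvSplitCamelB p.2).map (fun w => (some (String.ofList w) : Option String)))
      out (PySem.List.enumerate ps j)
      = out ++ ps.flatMap (fun q => (some "_" : Option String) :: pvW q) := by
  intro ps
  induction ps with
  | nil => intro out j hj; simp [PySem.List.enumerate_nil]
  | cons p ps ih =>
    intro out j hj
    rw [PySem.List.enumerate_cons, List.foldl_cons]
    have hj0 : (j == 0) = false := by simp; omega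
    rw [ih _ (j + 1) (by omega)]
    by_cases hp : p = [] <;> simp [hp, hj0, pvW, List.append_assoc]

lemma JA_flat : ∀ (ps : List (List Char)) (p : List Char),
    pvJA (p :: ps) = pvW p ++ ps.flatMap (fun q => (some "_" : Option String) :: pvW q) := by
  intro ps
  induction ps with
  | nil => intro p; simp [pvJA]
  | cons q qs ih =>
    intro p
    rw [pvJA, ih q]
    simp

theorem main_eq (identifier : Option String) :
    split_identifier_into_parts identifier = split_identifier_into_parts_alt identifier := by
  cases identifier with
  | none => rfl
  | some s =>
    rw [split_identifier_into_parts, split_identifier_into_parts_alt]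
    simp only []
    generalize PySem.Chars.splitOn s.toList ['_'] = snake
    rw [List.range_eq_range']
    rw [A1 snake snake 0 [] (by simp) (by simp)]
    cases snake with
    | nil => simp [pvJA, PySem.List.enumerate_nil]
    | cons p ps =>
      rw [PySem.List.enumerate_cons, List.foldl_cons]
      rw [show (0:Int) + 1 = 1 by norm_num, B1 ps _ 1 (by omega), JA_flat]
      by_cases hp : p = [] <;> simp [hp, pvW]

-- ===== VERDICT (by name: the statement is the Claim_ definition above) =====
theorem split_identifier_into_parts_spec : Claim_equal_split_identifier_into_parts := by
  intro identifier _
  unfold Spec_split_identifier_into_parts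
  exact main_eq identifier
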